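-- pv_equiv track=rewrite | github.com/stefanopalmieri/Kamea | ds_search/categorical_topos.py | wl_refine
-- ===== SOURCE A (Python) =====
-- def wl_refine(table, n, max_rounds=20):
--     """WL-1 color refinement. Returns (colors, num_rounds)."""
--     colors = list(range(n))
--     for rnd in range(max_rounds):
--         new_colors = {}
--         for x in range(n):
--             sig = (colors[x],
--                    tuple(colors[table[x][j]] for j in range(n)),
--                    tuple(colors[table[j][x]] for j in range(n)))
--             new_colors[x] = sig
--         # Map signatures to integers
--         sig_to_int = {}
--         next_id = 0
--         new_color_list = []
--         for x in range(n):
--             sig = new_colors[x]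
--             if sig not in sig_to_int:
--                 sig_to_int[sig] = next_id
--                 next_id += 1
--             new_color_list.append(sig_to_int[sig])
--         if new_color_list == colors:
--             return colors, rnd
--         colors = new_color_list
--     return colors, max_rounds
-- ===== SOURCE B (Python) =====
-- def wl_refine(table, n, max_rounds=20):
--     """WL-1 color refinement. Returns (colors, num_rounds).
--
--     Alternative decomposition: instead of threading a sig->id dict and a
--     next_id counter through a second pass, each new color is computed as a
--     closed form per vertex -- the number of distinct signatures occurring
--     strictly before the first occurrence of that vertex's signature.
--     """
--     colors = list(range(n))
--     for rnd in range(max_rounds):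
--         sigs = [(colors[x],
--                  tuple(colors[table[x][j]] for j in range(n)),
--                  tuple(colors[table[j][x]] for j in range(n)))
--                 for x in range(n)]
--         new = [len(set(sigs[:sigs.index(s)])) for s in sigs]
--         if new == colors:
--             return colors, rnd
--         colors = new
--     return colors, max_rounds
-- ===== Notes on version B (the rewrite author's own statement) =====
-- stated objective: alternative
-- what changed: Replaces A's stateful relabeling (sig->id dict plus a next_id counter threaded through a second pass over a vertex-keyed signature dict) by a stateless closed form: new color of x = number of distinct signatures occurring strictly before the first occurrence of x's signature, computed per element from the signature list; trades the dict machinery for extra index/set scans.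
import Mathlib
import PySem

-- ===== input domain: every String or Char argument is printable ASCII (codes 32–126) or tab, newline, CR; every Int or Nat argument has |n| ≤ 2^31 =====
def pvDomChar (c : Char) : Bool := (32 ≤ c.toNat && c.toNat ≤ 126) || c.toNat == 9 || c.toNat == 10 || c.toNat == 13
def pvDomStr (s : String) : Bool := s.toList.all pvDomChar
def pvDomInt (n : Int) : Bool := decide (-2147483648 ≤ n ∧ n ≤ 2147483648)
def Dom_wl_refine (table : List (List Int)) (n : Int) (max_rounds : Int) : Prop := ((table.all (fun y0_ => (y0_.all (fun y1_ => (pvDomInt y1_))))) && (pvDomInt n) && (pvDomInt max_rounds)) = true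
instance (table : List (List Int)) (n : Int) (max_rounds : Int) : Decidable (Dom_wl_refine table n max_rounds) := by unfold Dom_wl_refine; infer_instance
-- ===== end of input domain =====

-- B replaces A's stateful relabeling (sig->id dict + next_id counter threaded
-- through a second pass) by a stateless closed form per vertex: new color =
-- number of distinct signatures strictly before the first occurrence of this
-- vertex's signature (objective: alternative; not faster).

-- ===== PORT A =====
-- the signature tuple (colors[x], row tuple, column tuple); the pyGetD defaults
-- stand for Python's IndexError and are unreachable under Pre_ below
def pvSigA (table : List (List Int)) (n : Int) (colors : List Int) (x : Int) :
    Int × List Int × List Int :=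
  (PySem.List.pyGetD colors x 0,
   (PySem.List.pyRange 0 n 1).map (fun j =>
     PySem.List.pyGetD colors (PySem.List.pyGetD (PySem.List.pyGetD table x []) j 0) 0),
   (PySem.List.pyRange 0 n 1).map (fun j =>
     PySem.List.pyGetD colors (PySem.List.pyGetD (PySem.List.pyGetD table j []) x 0) 0))

-- body of A's second per-round loop: map signatures to ints with explicit next_id
def pvStepA (sigf : Int → Int × List Int × List Int)
    (st : PySem.Dict (Int × List Int × List Int) Int × Int × List Int) (x : Int) :
    PySem.Dict (Int × List Int × List Int) Int × Int × List Int :=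
  let sig := sigf x
  let s2i := if st.1.contains sig then st.1 else st.1.insert sig st.2.1
  let next_id := if st.1.contains sig then st.2.1 else st.2.1 + 1
  (s2i, next_id, st.2.2 ++ [s2i.getD sig 0])

-- for rnd in range(max_rounds), with the early return inside the loop
def pvLoopA (table : List (List Int)) (n max_rounds : Int) :
    Nat → Int → List Int → List Int × Int
  | 0, _, colors => (colors, max_rounds)
  | fuel + 1, rnd, colors =>
    let new_colors : PySem.Dict Int (Int × List Int × List Int) :=
      (PySem.List.pyRange 0 n 1).foldl
        (fun d x => d.insert x (pvSigA table n colors x)) PySem.Dict.empty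
    let st := (PySem.List.pyRange 0 n 1).foldl
      (pvStepA (fun x => (new_colors.get? x).getD (0, [], []))) (PySem.Dict.empty, 0, [])
    let new_color_list := st.2.2
    if new_color_list = colors then (colors, rnd)
    else pvLoopA table n max_rounds fuel (rnd + 1) new_color_list

def wl_refine (table : List (List Int)) (n : Int) (max_rounds : Int) : List Int × Int :=
  pvLoopA table n max_rounds max_rounds.toNat 0 (PySem.List.pyRange 0 n 1)

-- ===== PORT B =====
-- one round of B: the sigs comprehension, then the per-element closed form
-- len(set(sigs[:sigs.index(s)])) (sigs.index always succeeds: s ∈ sigs)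
def pvNewB (table : List (List Int)) (n : Int) (colors : List Int) : List Int :=
  let sigs := (PySem.List.pyRange 0 n 1).map (fun x =>
    (PySem.List.pyGetD colors x 0,
     (PySem.List.pyRange 0 n 1).map (fun j =>
       PySem.List.pyGetD colors (PySem.List.pyGetD (PySem.List.pyGetD table x []) j 0) 0),
     (PySem.List.pyRange 0 n 1).map (fun j =>
       PySem.List.pyGetD colors (PySem.List.pyGetD (PySem.List.pyGetD table j []) x 0) 0)))
  sigs.map (fun s =>
    ((PySem.Set.ofList (PySem.List.slice sigs none
        (some (((PySem.List.index? sigs s).getD 0 : Nat) : Int)))).length : Int))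

def pvLoopB (table : List (List Int)) (n max_rounds : Int) :
    Nat → Int → List Int → List Int × Int
  | 0, _, colors => (colors, max_rounds)
  | fuel + 1, rnd, colors =>
    let new := pvNewB table n colors
    if new = colors then (colors, rnd)
    else pvLoopB table n max_rounds fuel (rnd + 1) new

def wl_refine_alt (table : List (List Int)) (n : Int) (max_rounds : Int) : List Int × Int :=
  pvLoopB table n max_rounds max_rounds.toNat 0 (PySem.List.pyRange 0 n 1)

-- ===== PRECONDITION & SPEC =====
-- Pre_ excludes exactly the inputs on which A raises IndexError: with at least one
-- round and n > 0 the table must have n rows of length ≥ n whose first n entries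
-- index into a length-n color list (-n ≤ v < n).
def Pre_wl_refine (table : List (List Int)) (n : Int) (max_rounds : Int) : Prop :=
  max_rounds ≤ 0 ∨ n ≤ 0 ∨
    (n ≤ (table.length : Int) ∧
     ∀ row ∈ table.take n.toNat, n ≤ (row.length : Int) ∧
       ∀ v ∈ row.take n.toNat, -n ≤ v ∧ v < n)
instance (table : List (List Int)) (n : Int) (max_rounds : Int) :
    Decidable (Pre_wl_refine table n max_rounds) := by unfold Pre_wl_refine; infer_instance

def pvWitness_wl_refine : List (List Int) × Int × Int := ([[0, 1], [1, 0]], 2, 3)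

def Spec_wl_refine (table : List (List Int)) (n : Int) (max_rounds : Int) (out : List Int × Int) : Prop := out = wl_refine_alt table n max_rounds
instance (table : List (List Int)) (n : Int) (max_rounds : Int) (out : List Int × Int) : Decidable (Spec_wl_refine table n max_rounds out) := by unfold Spec_wl_refine; infer_instance

-- ===== CLAIM (what is proved, stated in full; the proofs are below) =====
def Claim_equal_wl_refine : Prop := ∀ (table : List (List Int)) (n : Int) (max_rounds : Int), Dom_wl_refine table n max_rounds → Pre_wl_refine table n max_rounds → Spec_wl_refine table n max_rounds (wl_refine table n max_rounds)

-- ===== LEMMAS AND PROOFS =====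

-- reference run of A's id-assignment pass: final dict and the list of assigned ids
def pvRun (sigf : Int → Int × List Int × List Int) :
    List Int → PySem.Dict (Int × List Int × List Int) Int →
    PySem.Dict (Int × List Int × List Int) Int × List Int
  | [], d => (d, [])
  | x :: xs, d =>
    let sig := sigf x
    let d' := if d.contains sig then d else d.insert sig (d.size : Int)
    let r := pvRun sigf xs d'
    (r.1, d'.getD sig 0 :: r.2)

-- B's per-element closed form, with index?/slice reduced to idx/take
def pvValB (S : List (Int × List Int × List Int)) (s : Int × List Int × List Int) : Int :=
  ((PySem.Set.ofList (S.take ((PySem.List.index? S s).getD 0))).length : Int)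

theorem pvFoldA (sigf : Int → Int × List Int × List Int) :
    ∀ (xs : List Int) (d : PySem.Dict (Int × List Int × List Int) Int)
      (next : Int) (acc : List Int), next = (d.size : Int) →
    xs.foldl (pvStepA sigf) (d, next, acc) =
      ((pvRun sigf xs d).1, ((pvRun sigf xs d).1.size : Int), acc ++ (pvRun sigf xs d).2) := by
  intro xs
  induction xs with
  | nil => intro d next acc h; simp [pvRun, h]
  | cons x xs ih =>
    intro d next acc h
    by_cases hc : d.contains (sigf x)
    · rw [List.foldl_cons]
      have hstep : pvStepA sigf (d, next, acc) x = (d, next, acc ++ [d.getD (sigf x) 0]) := by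
        simp [pvStepA, hc]
      rw [hstep, ih d next _ h]
      simp [pvRun, hc]
    · rw [List.foldl_cons]
      have hc' : d.contains (sigf x) = false := by simpa using hc
      have hstep : pvStepA sigf (d, next, acc) x =
          (d.insert (sigf x) next, next + 1,
           acc ++ [(d.insert (sigf x) next).getD (sigf x) 0]) := by
        simp [pvStepA, hc']
      rw [hstep, h, ih (d.insert (sigf x) (d.size : Int)) _ _ (by
        rw [PySem.Dict.size_insert]; simp [hc'])]
      simp [pvRun, hc']

-- in A's pass 1 every x in range(n) is a fresh key, so pass 2 reads back exactly pvSigA x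
theorem pvNewColorsGet (table : List (List Int)) (n : Int) (colors : List Int)
    (x : Int) (hx : x ∈ PySem.List.pyRange 0 n 1) :
    (((PySem.List.pyRange 0 n 1).foldl
        (fun d x => d.insert x (pvSigA table n colors x)) PySem.Dict.empty).get? x).getD
      (0, [], []) = pvSigA table n colors x := by
  have hitems := PySem.Dict.items_foldl_insert_fresh (PySem.List.pyRange 0 n 1)
    (fun a => a) (fun a => pvSigA table n colors a) PySem.Dict.empty
    (by intro a _; simp [PySem.Dict.contains_empty])
    (by simpa using PySem.List.nodup_pyRange_one 0 n)
  have hnd : (((PySem.List.pyRange 0 n 1).foldl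
      (fun d x => d.insert x (pvSigA table n colors x)) PySem.Dict.empty)).keys.Nodup := by
    exact PySem.Dict.nodup_keys_foldl_insert _ (fun _ a => pvSigA table n colors a) _
      (by simp [PySem.Dict.keys, PySem.Dict.empty])
  have hmem : (x, pvSigA table n colors x) ∈
      (((PySem.List.pyRange 0 n 1).foldl
        (fun d x => d.insert x (pvSigA table n colors x)) PySem.Dict.empty)).items := by
    rw [hitems]
    simp only [List.mem_append]
    right
    exact List.mem_map_of_mem hx
  rw [PySem.Dict.get?_of_mem_items _ hmem hnd]
  rfl

-- the heart of the equivalence: the values assigned by A's first-appearance id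
-- counter are exactly B's closed form "distinct sigs before the first occurrence"
theorem pvRun_values (sigf : Int → Int × List Int × List Int)
    (S : List (Int × List Int × List Int)) :
    ∀ (xs : List Int) (P : List (Int × List Int × List Int))
      (d : PySem.Dict (Int × List Int × List Int) Int),
    S = P ++ xs.map sigf →
    (∀ s, d.contains s = decide (s ∈ P)) →
    (∀ s ∈ P, d.getD s 0 = pvValB S s) →
    d.size = (PySem.Set.ofList P).length →
    (pvRun sigf xs d).2 = (xs.map sigf).map (pvValB S) := by
  intro xs
  induction xs with
  | nil => intro P d _ _ _ _; simp [pvRun]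
  | cons x xs ih =>
    intro P d hS hcont hgetD hsize
    by_cases hmem : sigf x ∈ P
    · -- seen signature: dict unchanged, stored value already equals the closed form
      have hc : d.contains (sigf x) = true := by rw [hcont]; simpa using hmem
      simp only [pvRun, hc, if_true, List.map_cons]
      congr 1
      · exact hgetD _ hmem
      · refine ih (P ++ [sigf x]) d ?_ ?_ ?_ ?_
        · simpa [List.append_assoc] using hS
        · intro s
          rw [hcont]
          have : s ∈ P ↔ s ∈ P ++ [sigf x] := by
            simp only [List.mem_append, List.mem_singleton]
            constructor
            · exact Or.inl
            · rintro (h | rfl); exact h; exact hmem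
          exact decide_eq_decide.mpr this
        · intro s hs
          rcases (by simpa using hs : s ∈ P ∨ s = sigf x) with h | rfl
          · exact hgetD _ h
          · exact hgetD _ hmem
        · rw [hsize, PySem.Set.ofList_append_singleton, PySem.Set.add,
              if_pos (by simp [PySem.Set.mem_ofList, hmem])]
    · -- fresh signature: the id handed out is |distinct(P)| = B's closed form
      have hc : d.contains (sigf x) = false := by rw [hcont]; simpa using hmem
      have hidx : PySem.List.index? S (sigf x) = some P.length := by
        rw [hS, List.map_cons, PySem.List.index?_eq_some_iff]
        exact ⟨P, xs.map sigf, rfl, rfl, hmem⟩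
      have htake : S.take P.length = P := by
        rw [hS]; exact List.take_left' rfl
      have hval : pvValB S (sigf x) = ((PySem.Set.ofList P).length : Int) := by
        rw [pvValB, hidx]; simp [htake]
      simp only [pvRun, hc, if_false, Bool.false_eq_true, List.map_cons]
      rw [PySem.Dict.getD_insert_self]
      congr 1
      · rw [hval, hsize]
      · refine ih (P ++ [sigf x]) (d.insert (sigf x) (d.size : Int)) ?_ ?_ ?_ ?_
        · simpa [List.append_assoc] using hS
        · intro s
          rw [PySem.Dict.contains_insert, hcont]
          simp only [List.mem_append, List.mem_singleton]
          by_cases h : s = sigf x <;> simp [h]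
        · intro s hs
          rcases (by simpa using hs : s ∈ P ∨ s = sigf x) with h | rfl
          · have hne : s ≠ sigf x := fun e => hmem (e ▸ h)
            rw [PySem.Dict.getD_insert, if_neg hne]
            exact hgetD _ h
          · rw [PySem.Dict.getD_insert_self, hval, hsize]
        · rw [PySem.Dict.size_insert, hc, hsize, PySem.Set.ofList_append_singleton,
              PySem.Set.add]
          simp [hmem]
  
-- one round of A equals one round of B
theorem pvRound_eq (table : List (List Int)) (n : Int) (colors : List Int) :
    (pvRun (pvSigA table n colors) (PySem.List.pyRange 0 n 1) PySem.Dict.empty).2 =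
      pvNewB table n colors := by
  have hsigs : ((PySem.List.pyRange 0 n 1).map (fun x =>
      (PySem.List.pyGetD colors x 0,
       (PySem.List.pyRange 0 n 1).map (fun j =>
         PySem.List.pyGetD colors (PySem.List.pyGetD (PySem.List.pyGetD table x []) j 0) 0),
       (PySem.List.pyRange 0 n 1).map (fun j =>
         PySem.List.pyGetD colors (PySem.List.pyGetD (PySem.List.pyGetD table j []) x 0) 0)))) =
      (PySem.List.pyRange 0 n 1).map (pvSigA table n colors) := rfl
  rw [pvNewB, hsigs]
  have hslice : ∀ s, PySem.List.slice ((PySem.List.pyRange 0 n 1).map (pvSigA table n colors)) none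
      (some (((PySem.List.index? ((PySem.List.pyRange 0 n 1).map (pvSigA table n colors)) s).getD 0 : Nat) : Int)) =
      ((PySem.List.pyRange 0 n 1).map (pvSigA table n colors)).take
        ((PySem.List.index? ((PySem.List.pyRange 0 n 1).map (pvSigA table n colors)) s).getD 0) := by
    intro s; exact PySem.List.slice_to_natCast _ _
  have hmapB : (((PySem.List.pyRange 0 n 1).map (pvSigA table n colors)).map (fun s =>
      ((PySem.Set.ofList (PySem.List.slice ((PySem.List.pyRange 0 n 1).map (pvSigA table n colors)) none
        (some (((PySem.List.index? ((PySem.List.pyRange 0 n 1).map (pvSigA table n colors)) s).getD 0 : Nat) : Int)))).length : Int))) =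
      (((PySem.List.pyRange 0 n 1).map (pvSigA table n colors)).map
        (pvValB ((PySem.List.pyRange 0 n 1).map (pvSigA table n colors)))) := by
    apply List.map_congr_left
    intro s _
    rw [hslice s, pvValB]
  rw [hmapB]
  exact pvRun_values (pvSigA table n colors) _ (PySem.List.pyRange 0 n 1) [] PySem.Dict.empty
    rfl (by intro s; simp [PySem.Dict.contains_empty]) (by intro s hs; simp at hs)
    (by simp [PySem.Dict.size_empty, PySem.Set.ofList_nil])

theorem pvLoop_eq (table : List (List Int)) (n mr : Int) :
    ∀ (fuel : Nat) (rnd : Int) (colors : List Int),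
    pvLoopA table n mr fuel rnd colors = pvLoopB table n mr fuel rnd colors := by
  intro fuel
  induction fuel with
  | zero => intro rnd colors; rfl
  | succ fuel ih =>
    intro rnd colors
    rw [pvLoopA, pvLoopB]
    have hcongr : (PySem.List.pyRange 0 n 1).foldl
        (pvStepA (fun x =>
          (((PySem.List.pyRange 0 n 1).foldl
            (fun d x => d.insert x (pvSigA table n colors x)) PySem.Dict.empty).get? x).getD
            (0, [], []))) (PySem.Dict.empty, 0, []) =
      (PySem.List.pyRange 0 n 1).foldl (pvStepA (pvSigA table n colors))
        (PySem.Dict.empty, 0, []) := by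
      apply PySem.List.foldl_congr_mem
      intro acc x hx
      simp only [pvStepA, pvNewColorsGet table n colors x hx]
    rw [hcongr, pvFoldA (pvSigA table n colors) _ _ _ _ (by simp [PySem.Dict.empty])]
    simp only [List.nil_append, pvRound_eq table n colors]
    by_cases hid : pvNewB table n colors = colors
    · rw [if_pos hid, if_pos hid]
    · rw [if_neg hid, if_neg hid]
      exact ih (rnd + 1) _

-- ===== VERDICT (by name: the statement is the Claim_ definition above) =====
theorem wl_refine_spec : Claim_equal_wl_refine := by
  intro table n max_rounds _ _
  unfold Spec_wl_refine wl_refine wl_refine_alt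
  exact pvLoop_eq table n max_rounds max_rounds.toNat 0 _
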